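-- pv_equiv track=rewrite | github.com/microsoft/amplifier-bundle-dot-graph | modules/tool-dot-graph/amplifier_module_tool_dot_graph/analyze.py | _annotate_edges
-- ===== SOURCE A (Python) =====
-- def _annotate_edges(
--     dot_content: str, edges: list[tuple[str, str]], color: str, style: str
-- ) -> str:
--     """Insert per-edge attribute declarations into a DOT string.
--
--     Declarations are inserted on new lines immediately after the first line
--     that contains '{'.
--
--     Args:
--         dot_content: Raw DOT graph string.
--         edges: (src, dst) pairs to annotate.
--         color: DOT color value (e.g. "red").
--         style: DOT style value (e.g. "bold").
--
--     Returns: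
--         Modified DOT string with attribute lines injected, or the original
--         string unchanged if no edges are provided or no '{' is found.
--     """
--     if not edges:
--         return dot_content
--
--     lines = dot_content.split("\n")
--     insert_idx: int | None = None
--     for i, line in enumerate(lines):
--         if "{" in line:
--             insert_idx = i + 1
--             break
--
--     if insert_idx is None:
--         return dot_content
--
--     new_lines = [
--         f'  {src} -> {dst} [color="{color}", style="{style}"];' for src, dst in edges
--     ]
--     return "\n".join(lines[:insert_idx] + new_lines + lines[insert_idx:])
-- ===== SOURCE B (Python) =====
-- def _annotate_edges(
--     dot_content: str, edges: list[tuple[str, str]], color: str, style: str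
-- ) -> str:
--     """Insert per-edge attribute declarations into a DOT string.
--
--     Works on the raw string: find the first '{', then the newline ending
--     that line, and splice the annotation block in at that character index
--     (no split/join over a line list).
--     """
--     if not edges:
--         return dot_content
--
--     brace = dot_content.find("{")
--     if brace == -1:
--         return dot_content
--
--     block = "\n".join(
--         f'  {src} -> {dst} [color="{color}", style="{style}"];' for src, dst in edges
--     )
--     nl = dot_content.find("\n", brace)
--     if nl == -1:
--         return dot_content + "\n" + block
--     return dot_content[:nl] + "\n" + block + dot_content[nl:]
-- ===== Notes on version B (the rewrite author's own statement) =====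
-- stated objective: simpler
-- what changed: B splices the annotation block into the raw string at the character index of the newline ending the first '{' line (two str.find calls and one concatenation) instead of splitting into a line list, scanning it with enumerate, and re-joining.
import Mathlib
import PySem

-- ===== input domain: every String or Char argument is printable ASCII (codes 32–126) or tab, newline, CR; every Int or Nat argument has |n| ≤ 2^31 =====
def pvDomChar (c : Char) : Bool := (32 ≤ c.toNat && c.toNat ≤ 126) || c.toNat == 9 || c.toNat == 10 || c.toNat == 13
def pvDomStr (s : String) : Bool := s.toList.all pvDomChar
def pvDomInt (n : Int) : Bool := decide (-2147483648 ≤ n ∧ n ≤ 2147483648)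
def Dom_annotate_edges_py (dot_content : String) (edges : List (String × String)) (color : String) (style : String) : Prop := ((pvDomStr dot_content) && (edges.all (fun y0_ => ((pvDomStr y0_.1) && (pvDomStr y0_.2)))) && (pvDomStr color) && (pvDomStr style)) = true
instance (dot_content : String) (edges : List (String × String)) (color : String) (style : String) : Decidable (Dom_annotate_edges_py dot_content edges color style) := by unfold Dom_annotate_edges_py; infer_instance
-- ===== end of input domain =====

-- B splices the annotation block into the raw string at the newline ending the first
-- '{' line (two finds + one concatenation) instead of A's split-lines/enumerate/re-join;
-- objective: simpler. Proved equal on all inputs.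

-- the f-string '  {src} -> {dst} [color="{color}", style="{style}"];' (identical in both Pythons)
def pvFmtLine (color style : String) (e : String × String) : List Char :=
  "  ".toList ++ e.1.toList ++ " -> ".toList ++ e.2.toList ++ " [color=\"".toList ++
    color.toList ++ "\", style=\"".toList ++ style.toList ++ "\"];".toList

-- ===== PORT A =====
-- A's for-loop over enumerate(lines): the first line containing '{' gives insert_idx = i+1
def pvFindIdx : List (List Char) → Nat → Option Nat
  | [], _ => none
  | l :: ls, i => if PySem.Chars.isIn ['{'] l then some (i + 1) else pvFindIdx ls (i + 1)

def annotate_edges_py (dot_content : String) (edges : List (String × String)) (color : String) (style : String) : String :=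
  if edges = [] then dot_content
  else
    let lines := PySem.Chars.splitOn dot_content.toList ['\n']
    match pvFindIdx lines 0 with
    | none => dot_content
    | some idx =>
      let newLines := edges.map (pvFmtLine color style)
      String.ofList (PySem.Chars.join ['\n'] (lines.take idx ++ newLines ++ lines.drop idx))

-- ===== PORT B =====
def annotate_edges_py_alt (dot_content : String) (edges : List (String × String)) (color : String) (style : String) : String :=
  if edges = [] then dot_content
  else
    let s := dot_content.toList
    let brace := PySem.Chars.find s ['{']
    if brace = -1 then dot_content
    else
      let block := PySem.Chars.join ['\n'] (edges.map (pvFmtLine color style))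
      let nl := PySem.Chars.findFrom s ['\n'] brace none
      if nl = -1 then String.ofList (s ++ '\n' :: block)
      else String.ofList (PySem.Chars.slice s none (some nl) ++ '\n' :: block ++ PySem.Chars.slice s (some nl) none)

-- ===== PRECONDITION & SPEC =====
def Spec_annotate_edges_py (dot_content : String) (edges : List (String × String)) (color : String) (style : String) (out : String) : Prop := out = annotate_edges_py_alt dot_content edges color style
instance (dot_content : String) (edges : List (String × String)) (color : String) (style : String) (out : String) : Decidable (Spec_annotate_edges_py dot_content edges color style out) := by unfold Spec_annotate_edges_py; infer_instance

-- ===== CLAIM (what is proved, stated in full; the proofs are below) =====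
def Claim_equal_annotate_edges_py : Prop := ∀ (dot_content : String) (edges : List (String × String)) (color : String) (style : String), Dom_annotate_edges_py dot_content edges color style → Spec_annotate_edges_py dot_content edges color style (annotate_edges_py dot_content edges color style)

-- ===== LEMMAS AND PROOFS =====

-- canonical single-pass form both ports reduce to (proof-only)
def pvScan2 (block : List Char) : List Char → List Char
  | [] => '\n' :: block
  | c :: r => if c = '\n' then '\n' :: block ++ '\n' :: r else c :: pvScan2 block r

def pvScan1 (block : List Char) : List Char → List Char
  | [] => []
  | c :: r => if c = '{' then '{' :: pvScan2 block r else c :: pvScan1 block r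

-- reference splitter characterizing PySem.Chars.splitOn on sep = ['\n']
def pvSplit (pre : List Char) : List Char → List (List Char)
  | [] => [pre]
  | c :: r => if c = '\n' then pre :: pvSplit [] r else pvSplit (pre ++ [c]) r

theorem pv_go_split (l : List Char) : ∀ (fuel : Nat) (cur : List Char) (acc : List (List Char)),
    l.length < fuel →
    PySem.Chars.splitOn.go ['\n'] fuel l cur acc = acc.reverse ++ pvSplit cur.reverse l := by
  induction l with
  | nil =>
    intro fuel cur acc h
    cases fuel with
    | zero => omega
    | succ fuel => simp [PySem.Chars.splitOn.go, pvSplit]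
  | cons c r ih =>
    intro fuel cur acc h
    cases fuel with
    | zero => omega
    | succ fuel =>
      rw [PySem.Chars.splitOn.go]
      by_cases hc : c = '\n'
      · subst hc
        rw [if_pos (by simp [List.isPrefixOf])]
        simp only [List.length_cons, List.length_nil, List.drop_succ_cons, List.drop_zero]
        rw [ih fuel [] (cur.reverse :: acc) (by simp at h; omega)]
        simp [pvSplit]
      · rw [if_neg (by simp [List.isPrefixOf]; exact fun h' => hc h'.symm)]
        rw [ih fuel (c :: cur) acc (by simp at h ⊢; omega)]
        simp [pvSplit, hc]

theorem pv_splitOn_eq (s : List Char) : PySem.Chars.splitOn s ['\n'] = pvSplit [] s := by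
  rw [PySem.Chars.splitOn, pv_go_split s (s.length+1) [] [] (by omega)]; simp

theorem pv_findgo_eq (l : List Char) : ∀ (k : Nat) (c : Char),
    PySem.Chars.find.go [c] l k = if c ∈ l then ((k + l.idxOf c : Nat) : Int) else -1 := by
  induction l with
  | nil => intro k c; simp [PySem.Chars.find.go]
  | cons a r ih =>
    intro k c
    rw [PySem.Chars.find.go]
    by_cases hc : c = a
    · subst hc; rw [if_pos (by simp [List.isPrefixOf])]; simp [List.idxOf_cons_self]
    · rw [if_neg (by simp [List.isPrefixOf]; exact fun h' => hc h')]
      rw [ih (k+1) c]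
      simp [hc, Ne.symm hc]
      split_ifs with h
      · ring
      · rfl

theorem pv_find_eq_char (s : List Char) (c : Char) :
    PySem.Chars.find s [c] = if c ∈ s then ((s.idxOf c : Nat) : Int) else -1 := by
  rw [PySem.Chars.find, pv_findgo_eq]; simp

theorem pv_mem_decomp (a : Char) (s : List Char) (h : a ∈ s) :
    ∃ p q, s = p ++ a :: q ∧ a ∉ p ∧ s.idxOf a = p.length := by
  induction s with
  | nil => simp at h
  | cons c r ih =>
    by_cases hc : c = a
    · subst hc; exact ⟨[], r, by simp, by simp, by simp⟩
    · have hm : a ∈ r := by rcases List.mem_cons.1 h with h' | h'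
                            · exact absurd h'.symm hc
                            · exact h'
      obtain ⟨p, q, hs, hp, hi⟩ := ih hm
      have hb : (c == a) = false := by simp [hc]
      refine ⟨c :: p, q, by simp [hs], ?_, ?_⟩
      · simp only [List.mem_cons, not_or]
        exact ⟨fun h' => hc h'.symm, hp⟩
      · simp [List.idxOf_cons, hb, hi]

theorem pv_scan1_decomp (block p q : List Char) (h : '{' ∉ p) :
    pvScan1 block (p ++ '{' :: q) = p ++ '{' :: pvScan2 block q := by
  induction p with
  | nil => simp [pvScan1]
  | cons c r ih =>
    simp only [List.mem_cons, not_or] at h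
    simp only [List.cons_append, pvScan1]
    rw [if_neg (fun h' => h.1 h'.symm), ih h.2]

theorem pv_scan2_no (block q : List Char) (h : '\n' ∉ q) : pvScan2 block q = q ++ '\n' :: block := by
  induction q with
  | nil => rfl
  | cons c r ih =>
    simp only [List.mem_cons, not_or] at h
    simp only [pvScan2]
    rw [if_neg (fun h' => h.1 h'.symm), ih h.2]
    simp

theorem pv_scan2_yes (block q1 q2 : List Char) (h : '\n' ∉ q1) :
    pvScan2 block (q1 ++ '\n' :: q2) = q1 ++ '\n' :: block ++ '\n' :: q2 := by
  induction q1 with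
  | nil => simp [pvScan2]
  | cons c r ih =>
    simp only [List.mem_cons, not_or] at h
    simp only [List.cons_append, pvScan2]
    rw [if_neg (fun h' => h.1 h'.symm), ih h.2]

theorem pv_isIn_brace (l : List Char) : PySem.Chars.isIn ['{'] l = decide ('{' ∈ l) := by
  by_cases h : '{' ∈ l
  · simp [h, PySem.Chars.isIn_iff_infix, List.singleton_infix_iff]
  · simp only [h, decide_false]
    rw [PySem.Chars.isIn_eq_false_iff, List.singleton_infix_iff]
    exact h

theorem pv_findIdx_shift (L : List (List Char)) : ∀ i, pvFindIdx L (i + 1) = Option.map (· + 1) (pvFindIdx L i) := by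
  induction L with
  | nil => intro i; rfl
  | cons l ls ih =>
    intro i
    simp only [pvFindIdx]
    split_ifs with h
    · rfl
    · exact ih (i + 1)

theorem pv_findIdx_found (r : List Char) : ∀ pre, '{' ∈ pre → pvFindIdx (pvSplit pre r) 0 = some 1 := by
  induction r with
  | nil => intro pre h; simp [pvSplit, pvFindIdx, pv_isIn_brace, h]
  | cons c r ih =>
    intro pre h
    simp only [pvSplit]
    split_ifs with hc
    · simp [pvFindIdx, pv_isIn_brace, h]
    · exact ih (pre ++ [c]) (by simp [h])

theorem pvSplit_ne_nil (cs : List Char) : ∀ pre, pvSplit pre cs ≠ [] := by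
  induction cs with
  | nil => intro pre; simp [pvSplit]
  | cons c r ih =>
    intro pre
    simp only [pvSplit]
    split_ifs
    · simp
    · exact ih (pre ++ [c])

theorem pv_join_cons (x : List Char) (L : List (List Char)) (h : L ≠ []) :
    PySem.Chars.join ['\n'] (x :: L) = x ++ '\n' :: PySem.Chars.join ['\n'] L := by
  obtain ⟨y, M, rfl⟩ := List.exists_cons_of_ne_nil h
  rw [PySem.Chars.join_cons_cons]; simp

theorem pv_join_split (cs : List Char) : ∀ pre, PySem.Chars.join ['\n'] (pvSplit pre cs) = pre ++ cs := by
  induction cs with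
  | nil => intro pre; simp [pvSplit, PySem.Chars.join_singleton]
  | cons c r ih =>
    intro pre
    simp only [pvSplit]
    split_ifs with hc
    · subst hc
      rw [pv_join_cons _ _ (pvSplit_ne_nil r []), ih []]
      simp
    · rw [ih (pre ++ [c])]; simp

theorem pv_findIdx_none (cs : List Char) : ∀ pre, '{' ∉ pre → '{' ∉ cs →
    pvFindIdx (pvSplit pre cs) 0 = none := by
  induction cs with
  | nil => intro pre h _; simp [pvSplit, pvFindIdx, pv_isIn_brace, h]
  | cons c r ih =>
    intro pre h hcs
    simp only [List.mem_cons, not_or] at hcs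
    by_cases hc : c = '\n'
    · subst hc
      have h1 : pvSplit pre ('\n' :: r) = pre :: pvSplit [] r := by simp [pvSplit]
      rw [h1]
      simp only [pvFindIdx, pv_isIn_brace, h, decide_false]
      rw [if_neg (by simp), pv_findIdx_shift _ 0, ih [] (by simp) hcs.2]
      rfl
    · have h1 : pvSplit pre (c :: r) = pvSplit (pre ++ [c]) r := by simp [pvSplit, hc]
      rw [h1]
      exact ih (pre ++ [c]) (by
        simp only [List.mem_append, List.mem_singleton, not_or]
        exact ⟨h, fun h' => hcs.1 h'⟩) hcs.2

theorem pv_findIdx_some (cs : List Char) : ∀ pre, '{' ∈ pre ++ cs →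
    ∃ j, pvFindIdx (pvSplit pre cs) 0 = some j := by
  induction cs with
  | nil =>
    intro pre h
    simp only [List.append_nil] at h
    exact ⟨1, by simp [pvSplit, pvFindIdx, pv_isIn_brace, h]⟩
  | cons c r ih =>
    intro pre h
    by_cases hc : c = '\n'
    · subst hc
      have h1 : pvSplit pre ('\n' :: r) = pre :: pvSplit [] r := by simp [pvSplit]
      rw [h1]
      by_cases hp : '{' ∈ pre
      · exact ⟨1, by simp [pvFindIdx, pv_isIn_brace, hp]⟩
      · have hr : '{' ∈ r := by
          rcases List.mem_append.mp h with h' | h'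
          · exact absurd h' hp
          · rcases List.mem_cons.mp h' with h'' | h''
            · exact absurd h'' (by decide)
            · exact h''
        obtain ⟨j, hj⟩ := ih [] (by simpa using hr)
        refine ⟨j + 1, ?_⟩
        simp only [pvFindIdx, pv_isIn_brace, hp, decide_false]
        rw [if_neg (by simp), pv_findIdx_shift _ 0, hj]
        rfl
    · have h1 : pvSplit pre (c :: r) = pvSplit (pre ++ [c]) r := by simp [pvSplit, hc]
      rw [h1]
      exact ih (pre ++ [c]) (by simpa using h)

theorem pv_join_append (A B : List (List Char)) (hA : A ≠ []) (hB : B ≠ []) :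
    PySem.Chars.join ['\n'] (A ++ B) = PySem.Chars.join ['\n'] A ++ '\n' :: PySem.Chars.join ['\n'] B := by
  induction A with
  | nil => simp at hA
  | cons x A ih =>
    cases A with
    | nil => simp [pv_join_cons x B hB, PySem.Chars.join_singleton]
    | cons y A' =>
      rw [List.cons_append, pv_join_cons x ((y :: A') ++ B) (by simp), ih (by simp),
        pv_join_cons x (y :: A') (by simp)]
      simp

theorem pv_lemA3 (NL : List (List Char)) (hNL : NL ≠ []) (r : List Char) : ∀ pre,
    PySem.Chars.join ['\n'] ((pvSplit pre r).take 1 ++ NL ++ (pvSplit pre r).drop 1)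
      = pre ++ pvScan2 (PySem.Chars.join ['\n'] NL) r := by
  induction r with
  | nil =>
    intro pre
    have h1 : pvSplit pre [] = [pre] := rfl
    rw [h1]
    have h2 : (([pre] : List (List Char)).take 1) = [pre] := rfl
    have h3 : (([pre] : List (List Char)).drop 1) = [] := rfl
    rw [h2, h3, List.append_nil, List.singleton_append, pv_join_cons pre NL hNL]
    rfl
  | cons c r ih =>
    intro pre
    by_cases hc : c = '\n'
    · subst hc
      have h1 : pvSplit pre ('\n' :: r) = pre :: pvSplit [] r := by simp [pvSplit]
      rw [h1, List.take_succ_cons, List.take_zero, List.drop_succ_cons, List.drop_zero]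
      rw [List.singleton_append, List.cons_append,
        pv_join_cons pre _ (by intro hx; exact hNL (List.append_eq_nil_iff.mp hx).1),
        pv_join_append NL _ hNL (pvSplit_ne_nil r []), pv_join_split r []]
      have h2 : pvScan2 (PySem.Chars.join ['\n'] NL) ('\n' :: r)
          = '\n' :: PySem.Chars.join ['\n'] NL ++ '\n' :: r := by simp [pvScan2]
      rw [h2]
      simp
    · have h1 : pvSplit pre (c :: r) = pvSplit (pre ++ [c]) r := by simp [pvSplit, hc]
      have h2 : pvScan2 (PySem.Chars.join ['\n'] NL) (c :: r)
          = c :: pvScan2 (PySem.Chars.join ['\n'] NL) r := by simp [pvScan2, hc]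
      rw [h1, h2, ih (pre ++ [c])]
      simp

theorem pv_lemA2 (NL : List (List Char)) (hNL : NL ≠ []) (cs : List Char) : ∀ pre, '{' ∉ pre →
    (match pvFindIdx (pvSplit pre cs) 0 with
     | none => pre ++ cs
     | some idx => PySem.Chars.join ['\n'] ((pvSplit pre cs).take idx ++ NL ++ (pvSplit pre cs).drop idx))
      = pre ++ pvScan1 (PySem.Chars.join ['\n'] NL) cs := by
  induction cs with
  | nil =>
    intro pre h
    simp [pvSplit, pvFindIdx, pv_isIn_brace, h, pvScan1]
  | cons c r ih =>
    intro pre h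
    by_cases hc : c = '\n'
    · subst hc
      have hsp : pvSplit pre ('\n' :: r) = pre :: pvSplit [] r := by simp [pvSplit]
      have hfi : pvFindIdx (pre :: pvSplit [] r) 0
          = Option.map (· + 1) (pvFindIdx (pvSplit [] r) 0) := by
        simp only [pvFindIdx, pv_isIn_brace, h, decide_false]
        rw [if_neg (by simp)]
        exact pv_findIdx_shift _ 0
      have hih := ih [] (by simp)
      simp only [List.nil_append] at hih
      have hs1 : pvScan1 (PySem.Chars.join ['\n'] NL) ('\n' :: r)
          = '\n' :: pvScan1 (PySem.Chars.join ['\n'] NL) r := by simp [pvScan1]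
      rw [hsp, hfi, hs1]
      cases hfj : pvFindIdx (pvSplit [] r) 0 with
      | none =>
        rw [hfj] at hih
        simp only [Option.map_none]
        rw [← hih]
      | some j =>
        rw [hfj] at hih
        have hih2 : PySem.Chars.join ['\n'] ((pvSplit [] r).take j ++ NL ++ (pvSplit [] r).drop j)
            = pvScan1 (PySem.Chars.join ['\n'] NL) r := hih
        simp only [Option.map_some]
        rw [List.take_succ_cons, List.drop_succ_cons]
        rw [show (pre :: (pvSplit [] r).take j) ++ NL ++ (pvSplit [] r).drop j
            = pre :: ((pvSplit [] r).take j ++ NL ++ (pvSplit [] r).drop j) by simp]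
        rw [pv_join_cons pre _ (by
            intro hx
            rcases List.append_eq_nil_iff.mp hx with ⟨h1, h2⟩
            exact hNL (List.append_eq_nil_iff.mp h1).2)]
        rw [hih2]
    · by_cases hb : c = '{'
      · subst hb
        have hsp : pvSplit pre ('{' :: r) = pvSplit (pre ++ ['{']) r := by simp [pvSplit]
        rw [hsp, pv_findIdx_found r (pre ++ ['{']) (by simp)]
        have hred : (match (some 1 : Option Nat) with
          | none => pre ++ '{' :: r
          | some idx => PySem.Chars.join ['\n'] ((pvSplit (pre ++ ['{']) r).take idx ++ NL ++ (pvSplit (pre ++ ['{']) r).drop idx))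
            = PySem.Chars.join ['\n'] ((pvSplit (pre ++ ['{']) r).take 1 ++ NL ++ (pvSplit (pre ++ ['{']) r).drop 1) := rfl
        rw [hred, pv_lemA3 NL hNL r (pre ++ ['{'])]
        have hs1 : pvScan1 (PySem.Chars.join ['\n'] NL) ('{' :: r)
            = '{' :: pvScan2 (PySem.Chars.join ['\n'] NL) r := by simp [pvScan1]
        rw [hs1]
        simp
      · have hsp : pvSplit pre (c :: r) = pvSplit (pre ++ [c]) r := by simp [pvSplit, hc]
        have hap : pre ++ c :: r = (pre ++ [c]) ++ r := by simp
        have hs1 : pvScan1 (PySem.Chars.join ['\n'] NL) (c :: r)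
            = c :: pvScan1 (PySem.Chars.join ['\n'] NL) r := by
          simp only [pvScan1]
          rw [if_neg hb]
        rw [hsp, hap, ih (pre ++ [c]) (by
          simp only [List.mem_append, List.mem_singleton, not_or]
          exact ⟨h, fun h' => hb h'.symm⟩), hs1]
        simp

theorem pv_main (dot_content : String) (edges : List (String × String)) (color style : String) :
    annotate_edges_py dot_content edges color style = annotate_edges_py_alt dot_content edges color style := by
  by_cases he : edges = []
  · simp [annotate_edges_py, annotate_edges_py_alt, he]
  · have hNL : edges.map (pvFmtLine color style) ≠ [] := by simpa using he
    simp only [annotate_edges_py, annotate_edges_py_alt, if_neg he, pv_splitOn_eq]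
    generalize dot_content.toList = cs
    by_cases hm : '{' ∈ cs
    · obtain ⟨p, q, hpq, hp, hidx⟩ := pv_mem_decomp '{' cs hm
      obtain ⟨j, hj⟩ := pv_findIdx_some cs [] (by simpa using hm)
      have hA := pv_lemA2 (edges.map (pvFmtLine color style)) hNL cs [] (by simp)
      rw [hj] at hA
      simp only [List.nil_append] at hA
      have hA2 : PySem.Chars.join ['\n']
          ((pvSplit [] cs).take j ++ edges.map (pvFmtLine color style) ++ (pvSplit [] cs).drop j)
          = pvScan1 (PySem.Chars.join ['\n'] (edges.map (pvFmtLine color style))) cs := hA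
      simp only [hj, hA2]
      have hfind : PySem.Chars.find cs ['{'] = ((p.length : Nat) : Int) := by
        rw [pv_find_eq_char, if_pos hm, hidx]
      have hlen : p.length ≤ cs.length := by rw [hpq]; simp
      have hff : PySem.Chars.findFrom cs ['\n'] ((p.length : Nat) : Int) none
          = if PySem.Chars.find (cs.drop p.length) ['\n'] = -1 then -1
            else (p.length : Int) + PySem.Chars.find (cs.drop p.length) ['\n'] :=
        PySem.Chars.findFrom_natCast cs ['\n'] p.length hlen
      have hdrop : cs.drop p.length = '{' :: q := by
        rw [hpq]; exact List.drop_left' rfl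
      rw [hfind, if_neg (by omega), hff, hdrop]
      by_cases hn : '\n' ∈ q
      · obtain ⟨q1, q2, hq, hq1, hqidx⟩ := pv_mem_decomp '\n' q hn
        have hfq : PySem.Chars.find ('{' :: q) ['\n'] = ((q1.length + 1 : Nat) : Int) := by
          rw [pv_find_eq_char, if_pos (by simp [hn])]
          congr 1
          rw [List.idxOf_cons]
          simp [hqidx]
        rw [hfq, if_neg (by omega), if_neg (by omega)]
        have hnl : ((p.length : Int) + ((q1.length + 1 : Nat) : Int)) = (((p.length + q1.length + 1 : Nat)) : Int) := by push_cast; ring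
        rw [hnl]
        have hslice1 : PySem.Chars.slice cs none (some (((p.length + q1.length + 1 : Nat)) : Int)) = p ++ '{' :: q1 := by
          rw [PySem.Chars.slice_eq_listSlice, PySem.List.slice_to_natCast]
          rw [hpq, hq]
          rw [show p ++ '{' :: (q1 ++ '\n' :: q2) = (p ++ '{' :: q1) ++ '\n' :: q2 by simp]
          exact List.take_left' (by simp; omega)
        have hslice2 : PySem.Chars.slice cs (some (((p.length + q1.length + 1 : Nat)) : Int)) none = '\n' :: q2 := by
          rw [PySem.Chars.slice_eq_listSlice, PySem.List.slice_from_natCast]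
          rw [hpq, hq]
          rw [show p ++ '{' :: (q1 ++ '\n' :: q2) = (p ++ '{' :: q1) ++ '\n' :: q2 by simp]
          exact List.drop_left' (by simp; omega)
        rw [hslice1, hslice2]
        congr 1
        rw [hpq, hq, pv_scan1_decomp _ p _ hp, pv_scan2_yes _ q1 q2 hq1]
        simp
      · have hfq : PySem.Chars.find ('{' :: q) ['\n'] = -1 := by
          rw [pv_find_eq_char, if_neg (by simp [hn])]
        rw [hfq, if_pos rfl, if_pos rfl]
        congr 1
        rw [hpq, pv_scan1_decomp _ p q hp, pv_scan2_no _ q hn]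
        simp
    · rw [pv_findIdx_none cs [] (by simp) hm]
      rw [pv_find_eq_char, if_neg hm, if_pos rfl]

-- ===== VERDICT (by name: the statement is the Claim_ definition above) =====
theorem annotate_edges_py_spec : Claim_equal_annotate_edges_py := by
  intro dot_content edges color style _
  unfold Spec_annotate_edges_py
  exact pv_main dot_content edges color style
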